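-- pv_equiv track=rewrite | github.com/ha4/pyalg | fontcb.py | bits2data
-- ===== SOURCE A (Python) =====
-- def bits2data(bb,sz=64):
--     bs=[]
--     bg=1<<(sz-1)
--     bc=0
--     while bg:
--         if bc==0:
--             bc=128
--             bo=0
--         if bb&bg:
--             bo|=bc
--         bg>>=1
--         bc>>=1
--         if bc==0:
--             bs.append(bo)
--     if bc:
--         bs.append(bo)
--     return bs
-- ===== SOURCE B (Python) =====
-- def bits2data(bb, sz=64):
--     # Emit the bytes big-endian directly: each full byte by one shift+mask,
--     # plus one left-aligned partial byte when sz is not a multiple of 8.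
--     bs = []
--     while sz >= 9:
--         bs.append((bb >> (sz - 8)) & 0xff)
--         sz -= 8
--     if sz >= 1:
--         bs.append((bb & ((1 << sz) - 1)) << (8 - sz))
--     return bs
-- ===== Notes on version B (the rewrite author's own statement) =====
-- stated objective: faster
-- what changed: B replaces A's bit-by-bit mask/accumulate loop (one iteration per bit, building each byte from per-bit flags) by a per-byte loop that extracts each output byte directly with one shift and mask, handling the trailing left-aligned partial byte by a single mask-and-shift.
import Mathlib
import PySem

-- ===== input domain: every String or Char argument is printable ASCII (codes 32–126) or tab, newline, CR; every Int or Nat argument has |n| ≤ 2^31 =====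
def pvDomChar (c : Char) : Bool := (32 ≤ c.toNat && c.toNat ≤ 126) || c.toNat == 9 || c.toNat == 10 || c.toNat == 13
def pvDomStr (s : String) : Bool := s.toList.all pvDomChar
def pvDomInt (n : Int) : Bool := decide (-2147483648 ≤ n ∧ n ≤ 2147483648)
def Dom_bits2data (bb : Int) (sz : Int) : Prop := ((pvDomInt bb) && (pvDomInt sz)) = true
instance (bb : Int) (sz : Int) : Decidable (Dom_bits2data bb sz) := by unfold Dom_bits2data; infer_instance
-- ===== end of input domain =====

-- B replaces A's bit-by-bit masking loop by a per-byte shift-and-mask loop (one iteration per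
-- output byte instead of one per bit); equal on sz ≥ 1, where Python's A returns.

-- ===== PORT A =====
-- termination helper for loopA (cited by its decreasing_by)
theorem pvShrOneLtToNat (bg : Int) (h : 0 < bg) : (bg >>> (1:Nat)).toNat < bg.toNat := by
  rw [Int.shiftRight_eq_div_pow]
  norm_num
  omega

-- the 'while bg:' loop of A; state (bg, bc, bo, bs); returns final (bc, bo, bs).
-- Python's loop ends when bg reaches 0; the guard 'bg ≤ 0' also stops on negative bg,
-- which never occurs under Pre_ (there Python would loop forever).
def loopA (bb bg bc bo : Int) (bs : List Int) : Int × Int × List Int :=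
  if h : bg ≤ 0 then (bc, bo, bs)
  else
    let bc1 := if bc = 0 then (128 : Int) else bc
    let bo1 := if bc = 0 then (0 : Int) else bo
    let bo2 := if PySem.Int.band bb bg ≠ 0 then PySem.Int.bor bo1 bc1 else bo1
    let bg2 := bg >>> (1:Nat)
    let bc2 := bc1 >>> (1:Nat)
    let bs2 := if bc2 = 0 then bs ++ [bo2] else bs
    loopA bb bg2 bc2 bo2 bs2
termination_by bg.toNat
decreasing_by exact pvShrOneLtToNat bg (by omega)

def bits2data (bb : Int) (sz : Int) : List Int :=
  -- bg = 1 << (sz-1); Python raises ValueError for sz ≤ 0 (negative shift), excluded by Pre_,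
  -- so (sz-1).toNat is only reached with sz ≥ 1
  let bg := (1 : Int) <<< (sz - 1).toNat
  let r := loopA bb bg 0 0 []
  if r.1 ≠ 0 then r.2.2 ++ [r.2.1] else r.2.2

-- ===== PORT B =====
-- Source B's while-loop: peel one full byte per iteration, accumulator bs; shifts guarded by the
-- branch conditions so the .toNat arguments are exact (sz-8 ≥ 1 resp. 1 ≤ sz ≤ 8)
def altLoop (bb sz : Int) (bs : List Int) : List Int :=
  if h : 9 ≤ sz then
    altLoop bb (sz - 8) (bs ++ [PySem.Int.band (bb >>> (sz - 8).toNat) 255])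
  else if 1 ≤ sz then
    bs ++ [PySem.Int.band bb (((1:Int) <<< sz.toNat) - 1) <<< (8 - sz).toNat]
  else bs
termination_by sz.toNat
decreasing_by omega

def bits2data_alt (bb : Int) (sz : Int) : List Int := altLoop bb sz []

-- ===== PRECONDITION & SPEC =====
-- Pre_ excludes exactly sz ≤ 0, where A raises ValueError (negative shift count)
def Pre_bits2data (bb : Int) (sz : Int) : Prop := 1 ≤ sz
instance (bb : Int) (sz : Int) : Decidable (Pre_bits2data bb sz) := by unfold Pre_bits2data; infer_instance
def pvWitness_bits2data : Int × Int := (5, 16)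

def Spec_bits2data (bb : Int) (sz : Int) (out : List Int) : Prop := out = bits2data_alt bb sz
instance (bb : Int) (sz : Int) (out : List Int) : Decidable (Spec_bits2data bb sz out) := by unfold Spec_bits2data; infer_instance

-- ===== CLAIM (what is proved, stated in full; the proofs are below) =====
def Claim_equal_bits2data : Prop := ∀ (bb : Int) (sz : Int), Dom_bits2data bb sz → Pre_bits2data bb sz → Spec_bits2data bb sz (bits2data bb sz)

-- ===== LEMMAS AND PROOFS =====

-- Python bitwise primitives re-expressed through floor division / modulus (divisor 2^k > 0,
-- so Int's ediv/emod agree with Python's floor semantics)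
theorem pvBandMod (x : Int) (k : Nat) : PySem.Int.band x ((2:Int)^k - 1) = x % (2:Int)^k := by
  have hP : (0:Int) < 2^k := by positivity
  have hcast : (((2:Nat)^k : Nat) : Int) = (2:Int)^k := by push_cast; ring
  by_cases hx : 0 ≤ x
  · rw [PySem.Int.band_of_nonneg hx (by omega)]
    have h1 : ((2:Int)^k - 1).toNat = 2^k - 1 := by omega
    rw [h1, Nat.and_two_pow_sub_one_eq_mod, Int.natCast_emod]
    rw [Int.toNat_of_nonneg hx, hcast]
  · rw [PySem.Int.band.eq_1]
    rw [if_neg (by omega), if_pos (by omega : (0:Int) ≤ 2^k - 1)]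
    have h1 : ((2:Int)^k - 1).toNat = 2^k - 1 := by omega
    rw [h1]
    set n := (-x - 1).toNat with hn
    have hxn : x = -(n:Int) - 1 := by omega
    rw [Nat.land_comm, Nat.and_two_pow_sub_one_eq_mod]
    have hnm : n % 2^k < 2^k := Nat.mod_lt _ (by positivity)
    have hdm : n = 2^k * (n / 2^k) + n % 2^k := (Nat.div_add_mod n (2^k)).symm
    have hx2 : x = ((2:Int)^k - 1 - (n % 2^k : Nat)) + (2:Int)^k * (-((n / 2^k : Nat) : Int) - 1) := by
      rw [hxn]
      have : (n : Int) = (2:Int)^k * ((n / 2^k : Nat) : Int) + ((n % 2^k : Nat) : Int) := by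
        rw [← hcast]; exact_mod_cast congrArg (Nat.cast : Nat → Int) hdm
      rw [this]; ring
    rw [hx2, Int.add_mul_emod_self_left, Int.emod_eq_of_lt (by omega) (by omega)]
    omega

theorem pvBandPow (x : Int) (k : Nat) : PySem.Int.band x ((2:Int)^k) = (x / (2:Int)^k % 2) * (2:Int)^k := by
  have hP : (0:Int) < 2^k := by positivity
  have hcast : (((2:Nat)^k : Nat) : Int) = (2:Int)^k := by push_cast; ring
  have htop : ((2:Int)^k).toNat = 2^k := by omega
  by_cases hx : 0 ≤ x
  · rw [PySem.Int.band_of_nonneg hx (by omega), htop, Nat.and_two_pow,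
      Nat.testBit_eq_decide_div_mod_eq]
    have hdiv : x / (2:Int)^k = ((x.toNat / 2^k : Nat) : Int) := by
      rw [Int.natCast_div, Int.toNat_of_nonneg hx, hcast]
    rw [hdiv]
    by_cases h : x.toNat / 2^k % 2 = 1
    · simp [h, hcast]
      rw [max_eq_left hx, hdiv]; omega
    · simp [h]
      rw [max_eq_left hx, hdiv]; omega
  · rw [PySem.Int.band.eq_1, if_neg (by omega), if_pos (by omega : (0:Int) ≤ 2^k), htop]
    set n := (-x - 1).toNat with hn
    have hxn : x = -(n:Int) - 1 := by omega
    set q := n / 2^k with hq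
    set m := n % 2^k with hm
    have hmlt : m < 2^k := Nat.mod_lt _ (by positivity)
    have hdm : n = 2^k * q + m := (Nat.div_add_mod n (2^k)).symm
    have hx2 : x = ((2:Int)^k - 1 - (m:Int)) + (2:Int)^k * (-(q:Int) - 1) := by
      rw [hxn]
      have : (n : Int) = (2:Int)^k * (q:Int) + (m:Int) := by
        rw [← hcast]; exact_mod_cast congrArg (Nat.cast : Nat → Int) hdm
      rw [this]; ring
    have hdiv : x / (2:Int)^k = -(q:Int) - 1 := by
      rw [hx2, Int.add_mul_ediv_left _ _ (by omega : (2:Int)^k ≠ 0),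
        Int.ediv_eq_zero_of_lt (by omega) (by omega)]
      ring
    rw [hdiv, Nat.land_comm, Nat.and_two_pow, Nat.testBit_eq_decide_div_mod_eq, ← hq]
    by_cases h : q % 2 = 1
    · have h2 : (-(q:Int) - 1) % 2 = 0 := by omega
      simp [h, h2]
    · have h2 : (-(q:Int) - 1) % 2 = 1 := by omega
      simp [h, h2, hcast]

-- the binary digit decomposition x %% 2^(c+2) = (digit c+1)*2^(c+1) + x %% 2^(c+1) is pvModSucc
theorem pvBorDisjoint (m : Int) (c : Nat) (hm : 0 ≤ m) :
    PySem.Int.bor (m * (2:Int)^(c+1)) ((2:Int)^c) = m * (2:Int)^(c+1) + (2:Int)^c := by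
  have h1 : 0 ≤ m * (2:Int)^(c+1) := by positivity
  rw [PySem.Int.bor_of_nonneg h1 (by positivity)]
  have h2 : (m * (2:Int)^(c+1)).toNat = 2^(c+1) * m.toNat := by
    have : m * (2:Int)^(c+1) = ((2^(c+1) * m.toNat : Nat) : Int) := by
      push_cast [Int.toNat_of_nonneg hm]; ring
    rw [this, Int.toNat_natCast]
  have h3 : ((2:Int)^c).toNat = 2^c := by
    have : (0:Int) < 2^c := by positivity
    have hc : (((2:Nat)^c : Nat) : Int) = (2:Int)^c := by push_cast; ring
    omega
  rw [h2, h3, ← Nat.two_pow_add_eq_or_of_lt (Nat.pow_lt_pow_right one_lt_two (Nat.lt_succ_self c))]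
  push_cast [Int.toNat_of_nonneg hm]
  simp [pow_succ]; ring

theorem pvModSucc (x : Int) (c : Nat) :
    (x / (2:Int)^(c+1) % 2) * (2:Int)^(c+1) + x % (2:Int)^(c+1) = x % (2:Int)^(c+2) := by
  have hP : (0:Int) < 2^(c+1) := by positivity
  set P := (2:Int)^(c+1) with hPdef
  set q := x / P with hq
  set r := x % P with hr
  have hx : x = P * q + r := (Int.ediv_add_emod x P).symm
  have hr0 : 0 ≤ r := Int.emod_nonneg x (by omega)
  have hrlt : r < P := Int.emod_lt_of_pos x hP
  have hq2 : q = 2 * (q / 2) + q % 2 := by omega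
  have hx2 : x = (q % 2 * P + r) + (2 * P) * (q / 2) := by
    rw [hx]; nth_rewrite 1 [hq2]; ring
  have h22 : (2:Int)^(c+2) = 2 * P := by rw [hPdef]; ring
  have h01 : q % 2 = 0 ∨ q % 2 = 1 := by omega
  have hb1 : 0 ≤ q % 2 * P := by rcases h01 with h | h <;> rw [h] <;> [rw [zero_mul]; rw [one_mul]] <;> omega
  have hb2 : q % 2 * P + r < 2 * P := by rcases h01 with h | h <;> rw [h] <;> [rw [zero_mul]; rw [one_mul]] <;> omega
  rw [h22, hx2, Int.add_mul_emod_self_left,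
    Int.emod_eq_of_lt (add_nonneg hb1 hr0) hb2]

theorem pvStepBo (bb : Int) (k c c1 : Nat) (m : Int) (hm : 0 ≤ m) (hc : c1 = c + 1) :
    (if PySem.Int.band bb ((2:Int)^k) ≠ 0 then PySem.Int.bor (m * (2:Int)^c1) ((2:Int)^c) else m * (2:Int)^c1)
      = m * (2:Int)^c1 + (bb / (2:Int)^k % 2) * (2:Int)^c := by
  subst hc
  have hd : bb / (2:Int)^k % 2 = 0 ∨ bb / (2:Int)^k % 2 = 1 := by omega
  rcases hd with hd | hd
  · rw [if_neg (by rw [pvBandPow, hd, zero_mul]; simp), hd, zero_mul, add_zero]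
  · rw [if_pos (by rw [pvBandPow, hd, one_mul]; positivity), pvBorDisjoint m c hm, hd, one_mul]

theorem pvLoopAReset (bb bg bo : Int) (bs : List Int) (h : 0 < bg) :
    loopA bb bg 0 bo bs = loopA bb bg 128 0 bs := by
  rw [loopA.eq_def]; conv_rhs => rw [loopA.eq_def]
  simp only [dif_neg (by omega : ¬ bg ≤ 0)]
  norm_num

theorem pvLoopASnoc (bb : Int) : ∀ (bg bc bo : Int) (bs : List Int),
    loopA bb bg bc bo bs =
      ((loopA bb bg bc bo []).1, (loopA bb bg bc bo []).2.1, bs ++ (loopA bb bg bc bo []).2.2) := by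
  suffices H : ∀ (n : Nat) (bg bc bo : Int) (bs : List Int), bg.toNat ≤ n →
      loopA bb bg bc bo bs =
        ((loopA bb bg bc bo []).1, (loopA bb bg bc bo []).2.1, bs ++ (loopA bb bg bc bo []).2.2) by
    exact fun bg bc bo bs => H bg.toNat bg bc bo bs le_rfl
  intro n
  induction n with
  | zero =>
    intro bg bc bo bs hn
    have hle : bg ≤ 0 := by omega
    have stop : ∀ bs' : List Int, loopA bb bg bc bo bs' = (bc, bo, bs') := by
      intro bs'; rw [loopA.eq_def, dif_pos hle]
    rw [stop bs, stop []]; simp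
  | succ n IH =>
    intro bg bc bo bs hn
    by_cases hle : bg ≤ 0
    · have stop : ∀ bs' : List Int, loopA bb bg bc bo bs' = (bc, bo, bs') := by
        intro bs'; rw [loopA.eq_def, dif_pos hle]
      rw [stop bs, stop []]; simp
    · have hlt : (bg >>> (1:Nat)).toNat ≤ n := by
        have := pvShrOneLtToNat bg (by omega); omega
      have IH' : ∀ (bc' bo' : Int) (bs' : List Int), loopA bb (bg >>> (1:Nat)) bc' bo' bs' =
          ((loopA bb (bg >>> (1:Nat)) bc' bo' []).1, (loopA bb (bg >>> (1:Nat)) bc' bo' []).2.1,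
            bs' ++ (loopA bb (bg >>> (1:Nat)) bc' bo' []).2.2) :=
        fun bc' bo' bs' => IH _ bc' bo' bs' hlt
      rw [loopA.eq_def]; conv_rhs => rw [loopA.eq_def]
      simp only [dif_neg hle]
      rw [IH']; conv_rhs => rw [IH']
      by_cases hz : (if bc = 0 then (128:Int) else bc) >>> (1:Nat) = 0 <;> simp [hz]

theorem pvAltPrefix (bb : Int) : ∀ (sz : Int) (bs : List Int),
    altLoop bb sz bs = bs ++ altLoop bb sz [] := by
  suffices H : ∀ (n : Nat) (sz : Int) (bs : List Int), sz.toNat ≤ n →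
      altLoop bb sz bs = bs ++ altLoop bb sz [] by
    exact fun sz bs => H sz.toNat sz bs le_rfl
  intro n
  induction n with
  | zero =>
    intro sz bs hn
    rw [altLoop.eq_def]; conv_rhs => rw [altLoop.eq_def]
    rw [dif_neg (by omega : ¬ (9:Int) ≤ sz), dif_neg (by omega : ¬ (9:Int) ≤ sz)]
    by_cases h1 : (1:Int) ≤ sz <;> simp [h1]
  | succ n IH =>
    intro sz bs hn
    by_cases h9 : (9:Int) ≤ sz
    · rw [altLoop.eq_def]; conv_rhs => rw [altLoop.eq_def]
      rw [dif_pos h9, dif_pos h9, IH (sz - 8) _ (by omega), IH (sz - 8) ([] ++ _) (by omega)]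
      simp
    · rw [altLoop.eq_def]; conv_rhs => rw [altLoop.eq_def]
      rw [dif_neg h9, dif_neg h9]
      by_cases h1 : (1:Int) ≤ sz <;> simp [h1]

theorem pvShrOneDiv (x : Int) : x >>> (1:Nat) = x / 2 := by
  rw [Int.shiftRight_eq_div_pow]; norm_num

theorem pvPowShr (j j' : Nat) (h : j = j' + 1) : ((2:Int)^j) >>> (1:Nat) = 2^j' := by
  subst h; rw [pvShrOneDiv, pow_succ]
  exact Int.mul_ediv_cancel _ two_ne_zero

theorem pvPowShr0 : ((2:Int)^0) >>> (1:Nat) = 0 := by decide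

theorem pvPowNe0 (j : Nat) : ((2:Int)^j) ≠ 0 := pow_ne_zero _ two_ne_zero

theorem pvPowNotLe0 (j : Nat) : ¬ ((2:Int)^j ≤ 0) := not_le.mpr (by positivity)

-- the loop ends inside the current byte: bits k..0 left, byte slots k+1+d..0 free
theorem pvPartial (k : Nat) : ∀ (d : Nat) (m bb : Int) (bs : List Int), 0 ≤ m →
    loopA bb ((2:Int)^k) ((2:Int)^(k+1+d)) (m * (2:Int)^(k+d+2)) bs =
      ((2:Int)^d, m * (2:Int)^(k+d+2) + (bb % (2:Int)^(k+1)) * (2:Int)^(d+1), bs) := by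
  induction k with
  | zero =>
    intro d m bb bs hm
    rw [loopA.eq_def, dif_neg (pvPowNotLe0 0)]
    dsimp only
    rw [if_neg (pvPowNe0 (0+1+d)), if_neg (pvPowNe0 (0+1+d)),
      pvStepBo bb 0 (0+1+d) (0+d+2) m hm (by omega),
      pvPowShr0, pvPowShr (0+1+d) d (by omega), if_neg (pvPowNe0 d)]
    rw [loopA.eq_def, dif_pos le_rfl]
    simp only [Prod.mk.injEq]
    refine ⟨trivial, ?_, trivial⟩
    rw [show ((2:Int)^(0+1)) = 2 by norm_num, show ((2:Int)^0) = 1 by norm_num, Int.ediv_one]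
    ring
  | succ k IH =>
    intro d m bb bs hm
    rw [loopA.eq_def, dif_neg (pvPowNotLe0 (k+1))]
    dsimp only
    rw [if_neg (pvPowNe0 (k+1+1+d)), if_neg (pvPowNe0 (k+1+1+d)),
      pvStepBo bb (k+1) (k+1+1+d) (k+1+d+2) m hm (by omega),
      pvPowShr (k+1) k rfl, pvPowShr (k+1+1+d) (k+1+d) (by omega), if_neg (pvPowNe0 (k+1+d))]
    have hbit0 : 0 ≤ bb / (2:Int)^(k+1) % 2 := by omega
    have hbo : m * (2:Int)^(k+1+d+2) + (bb / (2:Int)^(k+1) % 2) * (2:Int)^(k+1+1+d)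
        = (2*m + bb / (2:Int)^(k+1) % 2) * (2:Int)^(k+d+2) := by ring
    rw [hbo, IH d (2*m + bb / (2:Int)^(k+1) % 2) bb bs (by omega)]
    simp only [Prod.mk.injEq]
    refine ⟨trivial, ?_, trivial⟩
    rw [show ((2:Int)^(k+1+1)) = 2^(k+2) by ring]
    have hms := pvModSucc bb k
    linear_combination ((2:Int)^(d+1)) * hms

-- the current byte completes: c+1 slots left in the byte, c+e+1 bits left in the input
theorem pvByte (c : Nat) : ∀ (e : Nat) (m bb : Int) (bs : List Int), 0 ≤ m →
    loopA bb ((2:Int)^(c+e)) ((2:Int)^c) (m * (2:Int)^(c+1)) bs =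
      loopA bb ((2:Int)^(c+e) / (2:Int)^(c+1)) 0
        (m * (2:Int)^(c+1) + (bb / (2:Int)^e) % (2:Int)^(c+1))
        (bs ++ [m * (2:Int)^(c+1) + (bb / (2:Int)^e) % (2:Int)^(c+1)]) := by
  induction c with
  | zero =>
    intro e m bb bs hm
    rw [loopA.eq_def, dif_neg (pvPowNotLe0 (0+e))]
    dsimp only
    rw [if_neg (pvPowNe0 0), if_neg (pvPowNe0 0),
      pvStepBo bb (0+e) 0 (0+1) m hm (by omega),
      pvPowShr0, pvShrOneDiv ((2:Int)^(0+e)), if_pos rfl]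
    have h1 : ((2:Int)^(0+1)) = 2 := by norm_num
    have h2 : m * (2:Int)^(0+1) + bb / (2:Int)^(0+e) % 2 * (2:Int)^0
        = m * (2:Int)^(0+1) + (bb / (2:Int)^(0+e)) % (2:Int)^(0+1) := by
      rw [h1, show ((2:Int)^0) = 1 by norm_num]; ring
    rw [h2, h1]
    norm_num
  | succ c IH =>
    intro e m bb bs hm
    rw [loopA.eq_def, dif_neg (pvPowNotLe0 (c+1+e))]
    dsimp only
    rw [if_neg (pvPowNe0 (c+1)), if_neg (pvPowNe0 (c+1)),
      pvStepBo bb (c+1+e) (c+1) (c+1+1) m hm rfl,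
      pvPowShr (c+1+e) (c+e) (by omega), pvPowShr (c+1) c rfl, if_neg (pvPowNe0 c)]
    have hbit0 : 0 ≤ bb / (2:Int)^(c+1+e) % 2 := by omega
    have hbo : m * (2:Int)^(c+1+1) + (bb / (2:Int)^(c+1+e) % 2) * (2:Int)^(c+1)
        = (2*m + bb / (2:Int)^(c+1+e) % 2) * (2:Int)^(c+1) := by ring
    rw [hbo, IH e (2*m + bb / (2:Int)^(c+1+e) % 2) bb bs (by omega)]
    have hgg : (2:Int)^(c+e) / (2:Int)^(c+1) = (2:Int)^(c+1+e) / (2:Int)^(c+1+1) := by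
      rw [show ((2:Int)^(c+1+e)) = 2 * 2^(c+e) by ring, show ((2:Int)^(c+1+1)) = 2 * 2^(c+1) by ring,
        Int.mul_ediv_mul_of_pos _ _ two_pos]
    have hdd : bb / (2:Int)^(c+1+e) = (bb / (2:Int)^e) / (2:Int)^(c+1) := by
      rw [Int.ediv_ediv_eq_ediv_mul (by positivity : (0:Int) ≤ 2^e),
        show ((2:Int)^e * 2^(c+1)) = 2^(c+1+e) by ring]
    have hXY : (2*m + bb / (2:Int)^(c+1+e) % 2) * (2:Int)^(c+1) + (bb / (2:Int)^e) % (2:Int)^(c+1)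
        = m * (2:Int)^(c+1+1) + (bb / (2:Int)^e) % (2:Int)^(c+1+1) := by
      rw [hdd, show ((2:Int)^(c+1+1)) = 2^(c+2) by ring]
      have hms := pvModSucc (bb / (2:Int)^e) c
      linear_combination hms
    rw [hgg, hXY]

def pvWrap (r : Int × Int × List Int) : List Int := if r.1 ≠ 0 then r.2.2 ++ [r.2.1] else r.2.2

theorem pvWrapCons (a b : Int) (l t : List Int) :
    pvWrap (a, b, l ++ t) = l ++ pvWrap (a, b, t) := by
  unfold pvWrap; by_cases h : a ≠ 0 <;> simp [h]

theorem pvMain (s : Nat) : ∀ (bb : Int), 1 ≤ s →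
    pvWrap (loopA bb ((2:Int)^(s-1)) 0 0 []) = altLoop bb (s:Int) [] := by
  suffices H : ∀ (n : Nat) (s : Nat) (bb : Int), s ≤ n → 1 ≤ s →
      pvWrap (loopA bb ((2:Int)^(s-1)) 0 0 []) = altLoop bb (s:Int) [] by
    exact fun bb h => H s s bb le_rfl h
  intro n
  induction n with
  | zero => intro s bb hsn h1; omega
  | succ n IH =>
    intro s bb hsn h1
    obtain ⟨k, rfl⟩ : ∃ k, s = k + 1 := ⟨s - 1, by omega⟩
    rw [show (k+1) - 1 = k from rfl, pvLoopAReset bb _ 0 [] (by positivity),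
      show (128:Int) = 2^7 by norm_num]
    by_cases hk : k ≤ 6
    · -- 1 ≤ s ≤ 7: single left-aligned partial byte
      have hp := pvPartial k (6-k) 0 bb [] le_rfl
      rw [show k+1+(6-k) = 7 by omega, show k+(6-k)+2 = 8 by omega] at hp
      simp only [zero_mul, zero_add] at hp
      rw [hp]
      rw [show pvWrap ((2:Int)^(6-k), bb % (2:Int)^(k+1) * (2:Int)^(6-k+1), []) =
        [bb % (2:Int)^(k+1) * (2:Int)^(6-k+1)] from by unfold pvWrap; simp [pvPowNe0 (6-k)]]
      rw [altLoop.eq_def, dif_neg (by omega : ¬ (9:Int) ≤ ((k+1 : Nat) : Int)),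
        if_pos (by omega : (1:Int) ≤ ((k+1 : Nat) : Int))]
      rw [Int.toNat_natCast,
        show ((1:Int) <<< (k+1)) = 2^(k+1) from by rw [Int.shiftLeft_eq, one_mul],
        pvBandMod bb (k+1), show ((8:Int) - ((k+1:Nat):Int)).toNat = 7 - k by omega,
        Int.shiftLeft_eq, show (6-k)+1 = 7-k by omega]
      simp
    · by_cases hk8 : k = 7
      · -- s = 8: one full byte
        subst hk8
        have hb := pvByte 7 0 0 bb [] le_rfl
        simp only [zero_mul, zero_add, Nat.add_zero, pow_zero, Int.ediv_one] at hb
        rw [hb, show ((2:Int)^7 / 2^(7+1)) = 0 by decide]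
        rw [loopA.eq_def, dif_pos le_rfl]
        rw [show pvWrap (0, bb % (2:Int)^(7+1), [] ++ [bb % (2:Int)^(7+1)]) =
          [bb % (2:Int)^(7+1)] from by unfold pvWrap; simp]
        rw [altLoop.eq_def, dif_neg (by omega : ¬ (9:Int) ≤ ((7+1 : Nat) : Int)),
          if_pos (by omega : (1:Int) ≤ ((7+1 : Nat) : Int))]
        rw [Int.toNat_natCast,
          show ((1:Int) <<< ((7+1 : Nat))) = 2^(7+1) from by rw [Int.shiftLeft_eq, one_mul],
          pvBandMod bb (7+1), show ((8:Int) - ((7+1:Nat):Int)).toNat = 0 by omega,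
          Int.shiftLeft_eq]
        norm_num
      · -- s ≥ 9: peel the top byte and recurse
        have hk9 : 8 ≤ k := by omega
        have hb := pvByte 7 (k-7) 0 bb [] le_rfl
        simp only [zero_mul, zero_add] at hb
        rw [show 7+(k-7) = k by omega] at hb
        rw [hb]
        have e2 : (2:Int)^k / 2^(7+1) = 2^(k-8) := by
          rw [show ((2:Int)^k) = 2^(k-8) * 2^(7+1) from by rw [← pow_add]; congr 1; omega]
          exact Int.mul_ediv_cancel _ (pvPowNe0 _)
        rw [e2]
        have hres : loopA bb ((2:Int)^(k-8)) 0 ((bb / (2:Int)^(k-7)) % (2:Int)^(7+1))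
              ([] ++ [(bb / (2:Int)^(k-7)) % (2:Int)^(7+1)])
            = loopA bb ((2:Int)^(k-8)) 0 0 ([] ++ [(bb / (2:Int)^(k-7)) % (2:Int)^(7+1)]) := by
          rw [pvLoopAReset _ _ _ _ (by positivity), pvLoopAReset _ _ _ _ (by positivity)]
        rw [hres, pvLoopASnoc bb ((2:Int)^(k-8)) 0 0 ([] ++ [(bb / (2:Int)^(k-7)) % (2:Int)^(7+1)]),
          pvWrapCons]
        have hL : pvWrap ((loopA bb ((2:Int)^(k-8)) 0 0 []).1, (loopA bb ((2:Int)^(k-8)) 0 0 []).2.1,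
            (loopA bb ((2:Int)^(k-8)) 0 0 []).2.2) = pvWrap (loopA bb ((2:Int)^(k-8)) 0 0 []) := rfl
        rw [hL, show k-8 = (k-7)-1 by omega, IH (k-7) bb (by omega) (by omega)]
        conv_rhs => rw [altLoop.eq_def]
        rw [dif_pos (by omega : (9:Int) ≤ ((k+1 : Nat) : Int))]
        rw [show ((((k+1:Nat):Int)) - 8).toNat = k-7 by omega]
        rw [Int.shiftRight_eq_div_pow]
        have hc : (((2^(k-7) : Nat)) : Int) = (2:Int)^(k-7) := by push_cast; ring
        rw [hc, show (255:Int) = 2^8 - 1 by norm_num, pvBandMod (bb / (2:Int)^(k-7)) 8,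
          show ((2:Int)^(7+1)) = 2^8 by norm_num]
        conv_rhs => rw [pvAltPrefix]
        simp
        congr 1
        omega

-- ===== VERDICT (by name: the statement is the Claim_ definition above) =====
theorem bits2data_spec : Claim_equal_bits2data := by
  intro bb sz hdom hpre
  unfold Pre_bits2data at hpre
  unfold Spec_bits2data
  have hs : ((sz.toNat : Nat) : Int) = sz := by omega
  have h1 : 1 ≤ sz.toNat := by omega
  have hA : bits2data bb sz = pvWrap (loopA bb ((2:Int)^(sz.toNat - 1)) 0 0 []) := by
    unfold bits2data pvWrap
    rw [show (sz - 1).toNat = sz.toNat - 1 by omega,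
      show ((1:Int) <<< (sz.toNat - 1)) = 2^(sz.toNat - 1) from by rw [Int.shiftLeft_eq, one_mul]]
  rw [hA, pvMain sz.toNat bb h1, hs]
  rfl
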